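-- pv_equiv track=rewrite | github.com/ASSERT-KTH/Mokav | experiments/pynguin/c4b/return-lst/generated_tests/src_2451/6/src_2451.py | func
-- ===== SOURCE A (Python) =====
-- def func(*args):
-- 	ret_values = []
--
--
-- 	def count_times(row):
-- 	    res = int((row != ''))
-- 	    hand = 0
-- 	    n = len(row)
-- 	    for i in range(1, n):
-- 	        hand += 1
-- 	        if ((hand == 5) or (row[i] != row[(i - 1)])):
-- 	            hand = 0
-- 	            res += 1
-- 	    return res
-- 	row = args[0]
-- 	ret_values.append(count_times(row))
--
-- 	return ret_values
-- ===== SOURCE B (Python) =====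
-- def _runs(row):
--     # run-length encoding of row: peel one maximal run at a time
--     runs = []
--     i = 0
--     n = len(row)
--     while i < n:
--         k = i + 1
--         while k < n and row[k] == row[i]:
--             k += 1
--         runs.append((row[i], k - i))
--         i = k
--     return runs
--
-- def func(*args):
--     row = args[0]
--     res = int(row != '')
--     for j, (_, L) in enumerate(_runs(row)):
--         res += (L - 1) // 5 + (1 if j > 0 else 0)
--     return [res]
-- ===== Notes on version B (the rewrite author's own statement) =====
-- stated objective: alternative
-- what changed: Replaces A's single index loop with a hand-counter state machine by a run-length decomposition: peel maximal runs, then add (L-1)//5 per run plus 1 per non-initial run.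
import Mathlib
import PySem

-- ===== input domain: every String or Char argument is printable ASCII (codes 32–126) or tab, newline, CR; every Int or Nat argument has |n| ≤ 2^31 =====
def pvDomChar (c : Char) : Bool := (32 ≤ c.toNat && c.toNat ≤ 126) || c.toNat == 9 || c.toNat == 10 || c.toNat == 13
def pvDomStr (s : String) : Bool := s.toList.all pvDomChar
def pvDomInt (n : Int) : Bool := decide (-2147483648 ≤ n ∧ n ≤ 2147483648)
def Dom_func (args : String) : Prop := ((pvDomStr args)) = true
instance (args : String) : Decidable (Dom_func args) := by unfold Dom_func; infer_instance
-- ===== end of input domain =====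

-- B re-implements A by a different decomposition: run-length encode the string, then add
-- (L-1)//5 per run plus 1 per non-initial run (A instead walks indices with a hand counter).

-- ===== PORT A =====
-- literal port of A's count_times: res = int(row != ''); hand counter; for i in range(1, n)
def func (args : String) : List Int :=
  let row := args.toList
  let res0 : Int := if args ≠ "" then 1 else 0
  let n : Int := row.length
  let p :=
    (PySem.List.pyRange 1 n 1).foldl
      (fun (st : Int × Int) i =>
        let hand := st.2 + 1
        if hand == 5 || !(PySem.List.pyGetD row i ' ' == PySem.List.pyGetD row (i - 1) ' ') then
          (st.1 + 1, 0)
        else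
          (st.1, hand))
      (res0, 0)
  [p.1]

-- ===== PORT B =====
-- port of Source B's _runs: peel one maximal run at a time (the while loop is the takeWhile count)
def pvRuns : List Char → List (Char × Int)
  | [] => []
  | c :: rest =>
      let t := rest.takeWhile (fun x => x == c)
      (c, (1 + t.length : Int)) :: pvRuns (rest.drop t.length)
  termination_by l => l.length
  decreasing_by
    simp only [List.length_drop, List.length_cons]
    omega

def func_alt (args : String) : List Int :=
  let row := args.toList
  let res0 : Int := if args ≠ "" then 1 else 0
  let res :=
    ((pvRuns row).zipIdx).foldl
      (fun (res : Int) p =>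
        res + PySem.Int.floordiv (p.1.2 - 1) 5 + (if p.2 > 0 then 1 else 0))
      res0
  [res]

-- ===== PRECONDITION & SPEC =====
def Spec_func (args : String) (out : List Int) : Prop := out = func_alt args
instance (args : String) (out : List Int) : Decidable (Spec_func args out) := by unfold Spec_func; infer_instance

-- ===== CLAIM (what is proved, stated in full; the proofs are below) =====
def Claim_equal_func : Prop := ∀ (args : String), Dom_func args → Spec_func args (func args)

-- ===== LEMMAS AND PROOFS =====

def stepP (st : Int × Int) (pr : Char × Char) : Int × Int :=
  let hand := st.2 + 1
  if hand == 5 || !(pr.2 == pr.1) then (st.1 + 1, 0) else (st.1, hand)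

-- fold over indices 0..len-2 accessing getD k, getD (k+1) = fold over adjacent pairs
theorem foldl_range_zip : ∀ (cs : List Char) (st : Int × Int),
    (List.range (cs.length - 1)).foldl
      (fun st k => stepP st (cs.getD k ' ', cs.getD (k+1) ' ')) st
    = (cs.zip cs.tail).foldl stepP st := by
  intro cs
  induction cs with
  | nil => intro st; simp
  | cons a rest ih =>
    cases rest with
    | nil => intro st; simp
    | cons b t =>
      intro st
      have hlen : (a :: b :: t).length - 1 = ((b :: t).length - 1) + 1 := by simp
      rw [hlen, List.range_succ_eq_map]
      simp only [List.foldl_cons, List.foldl_map, List.getD_cons_succ, List.getD_cons_zero]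
      exact ih (stepP st (a, b))

theorem A_fold (cs : List Char) (init : Int × Int) :
    (PySem.List.pyRange 1 (cs.length : Int) 1).foldl
      (fun (st : Int × Int) i =>
        let hand := st.2 + 1
        if hand == 5 || !(PySem.List.pyGetD cs i ' ' == PySem.List.pyGetD cs (i - 1) ' ') then
          (st.1 + 1, 0)
        else
          (st.1, hand))
      init
    = (cs.zip cs.tail).foldl stepP init := by
  rw [PySem.List.pyRange_one, List.foldl_map]
  have hn : ((cs.length : Int) - 1).toNat = cs.length - 1 := by omega
  rw [hn]
  refine Eq.trans
    (PySem.List.foldl_congr_mem _ _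
      (g := fun (st : Int × Int) k => stepP st (cs.getD k ' ', cs.getD (k+1) ' ')) _ ?_)
    (foldl_range_zip cs init)
  intro st k _
  have h1 : (1 : Int) + (k : Int) = ((k+1 : Nat) : Int) := by push_cast; ring
  have h3 : ((k+1 : Nat) : Int) - 1 = ((k : Nat) : Int) := by push_cast; ring
  simp only [h1, h3, PySem.List.pyGetD_natCast]
  rfl

-- the pair list of a string decomposes at the first maximal run
theorem zip_decomp_nil (c : Char) (rest : List Char)
    (h : rest.drop (rest.takeWhile (fun x => x == c)).length = []) :
    (c :: rest).zip rest = List.replicate (rest.takeWhile (fun x => x == c)).length (c, c) := by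
  induction rest generalizing c with
  | nil => simp
  | cons x rest' ih =>
    by_cases hx : x = c
    · subst hx
      rw [List.takeWhile_cons_of_pos (by simp)] at h ⊢
      simp only [List.length_cons, List.drop_succ_cons] at h ⊢
      rw [List.replicate_succ]
      simpa using ih x h
    · rw [List.takeWhile_cons_of_neg (by simpa using hx)] at h
      simp only [List.length_nil, List.drop_zero] at h
      simp [h]

theorem zip_decomp_cons (c : Char) (rest : List Char) (d : Char) (r' : List Char)
    (h : rest.drop (rest.takeWhile (fun x => x == c)).length = d :: r') :
    (c :: rest).zip rest =
      List.replicate (rest.takeWhile (fun x => x == c)).length (c, c) ++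
        (c, d) :: ((d :: r').zip r') := by
  induction rest generalizing c with
  | nil => simp at h
  | cons x rest' ih =>
    by_cases hx : x = c
    · subst hx
      rw [List.takeWhile_cons_of_pos (by simp)] at h ⊢
      simp only [List.length_cons, List.drop_succ_cons] at h ⊢
      rw [List.replicate_succ]
      simpa using ih x h
    · rw [List.takeWhile_cons_of_neg (by simpa using hx)] at h
      simp only [List.length_nil, List.drop_zero] at h
      obtain ⟨rfl, rfl⟩ := List.cons.injEq .. ▸ (by exact ⟨(List.cons.inj h).1, (List.cons.inj h).2⟩ : x = d ∧ rest' = r')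
      simp
      exact hx

-- the element after the maximal run differs from the run's character
theorem head_drop_takeWhile (c : Char) : ∀ (l : List Char) (d : Char) (r' : List Char),
    l.drop (l.takeWhile (fun x => x == c)).length = d :: r' → d ≠ c := by
  intro l
  induction l with
  | nil => intro d r' h; simp at h
  | cons x rest ih =>
    intro d r' h
    by_cases hx : x = c
    · subst hx
      rw [List.takeWhile_cons_of_pos (by simp)] at h
      simp only [List.length_cons, List.drop_succ_cons] at h
      exact ih d r' h
    · rw [List.takeWhile_cons_of_neg (by simpa using hx)] at h
      simp only [List.length_nil, List.drop_zero] at h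
      cases h; exact hx

-- folding the hand-counter over k equal adjacent pairs, starting at hand = h < 5
theorem replicate_fold (c : Char) : ∀ (k : Nat) (res : Int) (h : Nat), h < 5 →
    (List.replicate k ((c, c) : Char × Char)).foldl stepP (res, (h : Int))
      = (res + ((h + k) / 5 : Nat), (((h + k) % 5 : Nat) : Int)) := by
  intro k
  induction k with
  | zero =>
    intro res h hh
    simp [Nat.div_eq_of_lt hh, Nat.mod_eq_of_lt hh]
  | succ k ihk =>
    intro res h hh
    rw [List.replicate_succ, List.foldl_cons]
    by_cases h4 : h = 4
    · subst h4
      have hstep : stepP (res, ((4 : Nat) : Int)) (c, c) = (res + 1, ((0 : Nat) : Int)) := by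
        simp [stepP]
      rw [hstep, ihk (res + 1) 0 (by omega)]
      have e1 : (0 + k) / 5 = (4 + (k + 1)) / 5 - 1 := by omega
      have e2 : (0 + k) % 5 = (4 + (k + 1)) % 5 := by omega
      have e3 : 1 ≤ (4 + (k + 1)) / 5 := by omega
      refine Prod.ext ?_ ?_
      · show res + 1 + ((0 + k) / 5 : Nat) = res + ((4 + (k + 1)) / 5 : Nat)
        omega
      · show (((0 + k) % 5 : Nat) : Int) = (((4 + (k + 1)) % 5 : Nat) : Int)
        rw [e2]
    · have hcond : ((h : Int) + 1 == 5 || !(c == c)) = false := by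
        simp
        omega
      have hstep : stepP (res, ((h : Int))) (c, c) = (res, ((h + 1 : Nat) : Int)) := by
        simp only [stepP, hcond]
        simp
      rw [hstep, ihk res (h + 1) (by omega)]
      have e : h + 1 + k = h + (k + 1) := by omega
      rw [e]


-- the hand-counter loop, run by run
theorem main_fold : ∀ (cs : List Char), cs ≠ [] → ∀ (res : Int),
    ((cs.zip cs.tail).foldl stepP (res, 0)).1
      = res + ((pvRuns cs).map (fun p => PySem.Int.floordiv (p.2 - 1) 5)).sum
          + (pvRuns cs).length - 1 := by
  intro cs
  induction cs using pvRuns.induct with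
  | case1 => intro h; exact absurd rfl h
  | case2 c rest t ih =>
    intro _ res
    rw [pvRuns]
    rcases hr : rest.drop (rest.takeWhile (fun x => x == c)).length with _ | ⟨d, r'⟩
    · have hz := zip_decomp_nil c rest hr
      simp only [List.tail_cons, hz]
      rw [show (res, (0 : Int)) = (res, ((0 : Nat) : Int)) from by norm_num,
        replicate_fold c _ res 0 (by omega)]
      simp [pvRuns]
    · have hz := zip_decomp_cons c rest d r' hr
      have hdc : d ≠ c := head_drop_takeWhile c rest d r' hr
      simp only [List.tail_cons, hz]
      rw [List.foldl_append,
        show (res, (0 : Int)) = (res, ((0 : Nat) : Int)) from by norm_num,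
        replicate_fold c _ res 0 (by omega)]
      rw [List.foldl_cons]
      have hstep : stepP (res + ((0 + (rest.takeWhile (fun x => x == c)).length) / 5 : Nat),
          (((0 + (rest.takeWhile (fun x => x == c)).length) % 5 : Nat) : Int)) (c, d)
          = (res + ((0 + (rest.takeWhile (fun x => x == c)).length) / 5 : Nat) + 1, 0) := by
        have : (d == c) = false := by simpa using hdc
        simp [stepP, this]
      rw [hstep]
      have hrne : d :: r' ≠ [] := by simp
      rw [hr] at ih
      simp only [List.tail_cons] at ih
      rw [ih hrne (res + ((0 + (rest.takeWhile (fun x => x == c)).length) / 5 : Nat) + 1)]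
      simp only [List.map_cons, List.sum_cons, List.length_cons]
      have hfd : PySem.Int.floordiv ((1 + ((rest.takeWhile (fun x => x == c)).length : Int)) - 1) 5
          = (((rest.takeWhile (fun x => x == c)).length / 5 : Nat) : Int) := by
        rw [show (1 + ((rest.takeWhile (fun x => x == c)).length : Int)) - 1
            = (((rest.takeWhile (fun x => x == c)).length : Nat) : Int) from by ring]
        exact_mod_cast PySem.Int.floordiv_natCast _ 5
      rw [hfd]
      push_cast
      omega

-- B's enumerate loop in closed form (every index positive: each run adds (L-1)//5 + 1)
theorem alt_fold : ∀ (rs : List (Char × Int)) (s : Nat), 1 ≤ s → ∀ (res : Int),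
    (rs.zipIdx s).foldl
      (fun (res : Int) p => res + PySem.Int.floordiv (p.1.2 - 1) 5 + (if p.2 > 0 then 1 else 0)) res
    = res + (rs.map (fun p => PySem.Int.floordiv (p.2 - 1) 5)).sum + rs.length := by
  intro rs
  induction rs with
  | nil => intro s _ res; simp
  | cons r rtail ih =>
    intro s hs res
    rw [List.zipIdx_cons, List.foldl_cons]
    simp only [if_pos (by omega : s > 0)]
    rw [ih (s + 1) (by omega)]
    simp only [List.map_cons, List.sum_cons, List.length_cons]
    push_cast
    ring

theorem func_eq_alt (args : String) : func args = func_alt args := by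
  simp only [func, func_alt]
  rcases hrow : args.toList with _ | ⟨c, rest⟩
  · simp [PySem.List.pyRange_one_eq_nil, pvRuns]
  · rw [A_fold (c :: rest) _]
    rw [main_fold (c :: rest) (by simp)]
    rw [pvRuns]
    rw [List.zipIdx_cons, List.foldl_cons]
    simp only [if_neg (by omega : ¬ (0 > 0))]
    rw [alt_fold _ 1 (by omega)]
    have hfd : PySem.Int.floordiv ((1 + ((rest.takeWhile (fun x => x == c)).length : Int)) - 1) 5
        = (((rest.takeWhile (fun x => x == c)).length / 5 : Nat) : Int) := by
      rw [show (1 + ((rest.takeWhile (fun x => x == c)).length : Int)) - 1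
          = (((rest.takeWhile (fun x => x == c)).length : Nat) : Int) from by ring]
      exact_mod_cast PySem.Int.floordiv_natCast _ 5
    simp only [List.map_cons, List.sum_cons, List.length_cons, hfd]
    push_cast
    congr 1
    omega

-- ===== VERDICT (by name: the statement is the Claim_ definition above) =====
theorem func_spec : Claim_equal_func := by
  intro args _
  unfold Spec_func
  exact func_eq_alt args
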